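-- pv_equiv track=rewrite | github.com/aleksas/phonology_engine | phonology_engine/phonology_engine.py | _get_word_mappings
-- ===== SOURCE A (Python) =====
-- def _get_word_mappings(phrase, normalized_phrase, letter_map, separators, offset_source=0, offset_normalized=0):
--     if len(normalized_phrase) != len(letter_map):
--         raise Exception("Phrase length differs from phrase letter map length (%d != %d)." % (len(normalized_phrase), len(letter_map)))
--     mappings = []
--     normalized_words = []
--
--     span_first = 0
--     map_length = len(letter_map)
--     for i, _ in enumerate(letter_map):
--         is_last = i == map_length - 1
--         if normalized_phrase[i] == ' ' or is_last:
--             if is_last: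
--                 i += 1
--                 mapped_end = len(phrase)
--             else:
--                 last_index = len(letter_map) - 1 - letter_map[::-1].index(letter_map[i - 1])
--                 if last_index == len(letter_map) - 1:
--                     mapped_end = len(phrase)
--                 else:
--                     mapped_end = letter_map[last_index + 1]
--             if i - span_first >= 1:
--                 mapping = (letter_map[span_first], mapped_end), (span_first, i)
--                 offsetted_mapping = (mapping[0][0] + offset_source, mapping[0][1] + offset_source), (mapping[1][0] + offset_source, mapping[1][1] + offset_source)
--                 mappings.append( offsetted_mapping )
--                 normalized_words.append( normalized_phrase[mapping[1][0]:mapping[1][1]])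
--             span_first = i + 1
--
--     return mappings, normalized_words
-- ===== SOURCE B (Python) =====
-- def _get_word_mappings(phrase, normalized_phrase, letter_map, separators, offset_source=0, offset_normalized=0):
--     n = len(letter_map)
--     if len(normalized_phrase) != n:
--         raise Exception("Phrase length differs from phrase letter map length (%d != %d)." % (len(normalized_phrase), n))
--     mappings = []
--     normalized_words = []
--
--     def emit(s, e, seen):
--         # map a normalized span [s, e) back to source coordinates
--         if e == n:
--             mapped_end = len(phrase)
--         else:
--             last = seen[letter_map[e - 1]]  # last occurrence, discovered from the right
--             mapped_end = len(phrase) if last == n - 1 else letter_map[last + 1]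
--         mappings.append(((letter_map[s] + offset_source, mapped_end + offset_source),
--                          (s + offset_source, e + offset_source)))
--         normalized_words.append(normalized_phrase[s:e])
--
--     # single right-to-left pass: the first time a letter_map value is met is its
--     # last occurrence; spans are closed against the current open end and emitted
--     # back-to-front, then both lists are reversed once.
--     seen = {}
--     end = n
--     for i in range(n - 1, -1, -1):
--         if letter_map[i] not in seen:
--             seen[letter_map[i]] = i
--         if normalized_phrase[i] == ' ' and i != n - 1:
--             if end > i + 1:
--                 emit(i + 1, end, seen)
--             end = i
--     if end > 0:
--         emit(0, end, seen)
--     mappings.reverse()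
--     normalized_words.reverse()
--     return mappings, normalized_words
-- ===== Notes on version B (the rewrite author's own statement) =====
-- stated objective: alternative
-- what changed: A scans left-to-right and, at every separator, rebuilds letter_map[::-1] and rescans it with .index to find the last occurrence; B makes a single right-to-left pass that discovers each value's last occurrence as its first sighting from the right, closes spans against the current open end, emits back-to-front and reverses once.
import Mathlib
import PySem

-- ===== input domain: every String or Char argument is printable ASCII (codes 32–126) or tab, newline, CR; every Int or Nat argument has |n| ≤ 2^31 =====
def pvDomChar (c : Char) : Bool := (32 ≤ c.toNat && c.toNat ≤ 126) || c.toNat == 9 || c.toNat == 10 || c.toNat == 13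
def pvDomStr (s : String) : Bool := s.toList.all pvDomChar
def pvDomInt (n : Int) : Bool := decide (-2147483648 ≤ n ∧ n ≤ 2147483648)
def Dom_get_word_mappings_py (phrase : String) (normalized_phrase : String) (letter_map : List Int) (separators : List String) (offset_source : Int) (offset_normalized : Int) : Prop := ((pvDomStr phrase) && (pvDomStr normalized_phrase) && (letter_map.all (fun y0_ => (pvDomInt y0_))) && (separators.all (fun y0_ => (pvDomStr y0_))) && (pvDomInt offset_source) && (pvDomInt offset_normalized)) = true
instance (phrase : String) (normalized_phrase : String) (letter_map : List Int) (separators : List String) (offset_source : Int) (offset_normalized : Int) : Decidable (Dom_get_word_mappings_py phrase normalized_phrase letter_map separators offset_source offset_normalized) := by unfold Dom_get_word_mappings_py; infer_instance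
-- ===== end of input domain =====

-- B replaces A's left-to-right scan (which rebuilds letter_map[::-1] and rescans it with .index at
-- every separator) by ONE right-to-left pass that meets each value's last occurrence first, closes
-- spans against the current open end, emits back-to-front and reverses once at the end.

-- ===== PORT A =====
-- A's single loop 'for i, _ in enumerate(letter_map)' with state (span_first, mappings, normalized_words),
-- as the obvious recursion on the index i.  letter_map[i-1] (possibly -1) is pyGetD (in range under Pre_;
-- for i = 0 Python wraps to the last element, which pyGetD reproduces); letter_map[::-1].index(v) is
-- index? letter_map.reverse v, always `some` here since v is drawn from letter_map, so .getD 0 is exact.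
def pvAGo (phrase_len : Int) (nps : String) (lm : List Int) (off : Int)
    (i sf : Nat) (ms : List ((Int × Int) × (Int × Int))) (ws : List String) :
    (List ((Int × Int) × (Int × Int))) × List String :=
  if h : i < lm.length then
    let is_last := i = lm.length - 1
    if PySem.List.pyGetD nps.toList (i : Int) ' ' = ' ' ∨ is_last then
      let i' := if is_last then i + 1 else i
      let mapped_end : Int :=
        if is_last then phrase_len
        else
          let last_index : Int := (lm.length : Int) - 1 -
            (((PySem.List.index? lm.reverse (PySem.List.pyGetD lm ((i : Int) - 1) 0)).getD 0 : Nat) : Int)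
          if last_index = (lm.length : Int) - 1 then phrase_len
          else PySem.List.pyGetD lm (last_index + 1) 0
      if sf + 1 ≤ i' then
        pvAGo phrase_len nps lm off (i + 1) (i' + 1)
          (ms ++ [((PySem.List.pyGetD lm (sf : Int) 0 + off, mapped_end + off),
                   ((sf : Int) + off, (i' : Int) + off))])
          (ws ++ [PySem.Str.slice nps (some (sf : Int)) (some (i' : Int))])
      else
        pvAGo phrase_len nps lm off (i + 1) (i' + 1) ms ws
    else
      pvAGo phrase_len nps lm off (i + 1) sf ms ws
  else (ms, ws)
termination_by lm.length - i

def get_word_mappings_py (phrase : String) (normalized_phrase : String) (letter_map : List Int) (separators : List String) (offset_source : Int) (offset_normalized : Int) : (List ((Int × Int) × (Int × Int))) × List String :=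
  if normalized_phrase.toList.length ≠ letter_map.length then ([], [])  -- Python raises here (excluded by Pre_)
  else pvAGo (PySem.Str.len phrase) normalized_phrase letter_map offset_source 0 0 [] []

-- ===== PORT B =====
-- Source B's local emit(s, e, seen): seen[...] is a present key there, so .getD 0 is exact.
def pvBEmit (phrase_len : Int) (nps : String) (lm : List Int) (seen : PySem.Dict Int Int) (off : Int)
    (s e : Nat) : ((Int × Int) × (Int × Int)) × String :=
  let mapped_end : Int :=
    if e = lm.length then phrase_len
    else
      let last := (seen.get? (PySem.List.pyGetD lm ((e : Int) - 1) 0)).getD 0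
      if last = (lm.length : Int) - 1 then phrase_len
      else PySem.List.pyGetD lm (last + 1) 0
  (((PySem.List.pyGetD lm (s : Int) 0 + off, mapped_end + off), ((s : Int) + off, (e : Int) + off)),
   PySem.Str.slice nps (some (s : Int)) (some (e : Int)))

-- Source B's 'for i in range(n-1, -1, -1)' loop (i here = Python's i + 1; 0 = loop done), followed by the
-- post-loop 'if end > 0: emit(0, end, seen)' and the two final list reversals.
def pvBGo (phrase_len : Int) (nps : String) (lm : List Int) (off : Int) :
    Nat → PySem.Dict Int Int → Nat → List ((Int × Int) × (Int × Int)) → List String →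
    (List ((Int × Int) × (Int × Int))) × List String
  | 0, seen, e, accM, accW =>
      if 0 < e then
        let p := pvBEmit phrase_len nps lm seen off 0 e
        ((accM ++ [p.1]).reverse, (accW ++ [p.2]).reverse)
      else (accM.reverse, accW.reverse)
  | i + 1, seen, e, accM, accW =>
      let v := PySem.List.pyGetD lm (i : Int) 0
      let seen' := if (seen.get? v).isNone then seen.insert v (i : Int) else seen
      if PySem.List.pyGetD nps.toList (i : Int) ' ' = ' ' ∧ i ≠ lm.length - 1 then
        if i + 1 < e then
          let p := pvBEmit phrase_len nps lm seen' off (i + 1) e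
          pvBGo phrase_len nps lm off i seen' i (accM ++ [p.1]) (accW ++ [p.2])
        else pvBGo phrase_len nps lm off i seen' i accM accW
      else pvBGo phrase_len nps lm off i seen' e accM accW

def get_word_mappings_py_alt (phrase : String) (normalized_phrase : String) (letter_map : List Int) (separators : List String) (offset_source : Int) (offset_normalized : Int) : (List ((Int × Int) × (Int × Int))) × List String :=
  if normalized_phrase.toList.length ≠ letter_map.length then ([], [])  -- Python raises here (excluded by Pre_)
  else
    pvBGo (PySem.Str.len phrase) normalized_phrase letter_map offset_source
      letter_map.length PySem.Dict.empty letter_map.length [] []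

-- ===== PRECONDITION & SPEC =====
-- Pre_ excludes exactly the inputs where A raises its explicit length-mismatch Exception.
def Pre_get_word_mappings_py (phrase : String) (normalized_phrase : String) (letter_map : List Int) (separators : List String) (offset_source : Int) (offset_normalized : Int) : Prop :=
  normalized_phrase.toList.length = letter_map.length
instance (phrase : String) (normalized_phrase : String) (letter_map : List Int) (separators : List String) (offset_source : Int) (offset_normalized : Int) : Decidable (Pre_get_word_mappings_py phrase normalized_phrase letter_map separators offset_source offset_normalized) := by unfold Pre_get_word_mappings_py; infer_instance

def pvWitness_get_word_mappings_py : String × String × List Int × List String × Int × Int :=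
  ("abc", "a b", [0, 1, 2], [], 0, 0)

def Spec_get_word_mappings_py (phrase : String) (normalized_phrase : String) (letter_map : List Int) (separators : List String) (offset_source : Int) (offset_normalized : Int) (out : (List ((Int × Int) × (Int × Int))) × List String) : Prop := out = get_word_mappings_py_alt phrase normalized_phrase letter_map separators offset_source offset_normalized
instance (phrase : String) (normalized_phrase : String) (letter_map : List Int) (separators : List String) (offset_source : Int) (offset_normalized : Int) (out : (List ((Int × Int) × (Int × Int))) × List String) : Decidable (Spec_get_word_mappings_py phrase normalized_phrase letter_map separators offset_source offset_normalized out) := by unfold Spec_get_word_mappings_py; infer_instance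

-- ===== CLAIM (what is proved, stated in full; the proofs are below) =====
def Claim_equal_get_word_mappings_py : Prop := ∀ (phrase : String) (normalized_phrase : String) (letter_map : List Int) (separators : List String) (offset_source : Int) (offset_normalized : Int), Dom_get_word_mappings_py phrase normalized_phrase letter_map separators offset_source offset_normalized → Pre_get_word_mappings_py phrase normalized_phrase letter_map separators offset_source offset_normalized → Spec_get_word_mappings_py phrase normalized_phrase letter_map separators offset_source offset_normalized (get_word_mappings_py phrase normalized_phrase letter_map separators offset_source offset_normalized)

-- ===== LEMMAS AND PROOFS =====

-- canonical middle form: the last occurrence of v among indices ≥ i (as A's reverse-index arithmetic yields it)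
def pvLastFrom (lm : List Int) (i : Nat) (v : Int) : Option Nat :=
  (PySem.List.index? ((lm.drop i).reverse) v).map (fun k => lm.length - 1 - k)

-- separator indices of the region [a, b) (spaces that are not the final character)
def pvSeps (np : List Char) (n a b : Nat) : List Nat :=
  (List.range' a (b - a)).filter (fun j => decide (np.getD j ' ' = ' ' ∧ j ≠ n - 1))

-- word spans from a list of separator indices, open start s, final end fin
def pvBuildSpans : Nat → List Nat → Nat → List (Nat × Nat)
  | s, [], fin => if s < fin then [(s, fin)] else []
  | s, j :: rest, fin => (if s < j then [(s, j)] else []) ++ pvBuildSpans (j + 1) rest fin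

-- one span mapped to its (mapping, word) pair, with the global last occurrence
def pvMapSpan (pl : Int) (nps : String) (lm : List Int) (off : Int) (se : Nat × Nat) :
    ((Int × Int) × (Int × Int)) × String :=
  let mapped_end : Int :=
    if se.2 = lm.length then pl
    else
      let last : Int := (((pvLastFrom lm 0 (PySem.List.pyGetD lm ((se.2 : Int) - 1) 0)).getD 0 : Nat) : Int)
      if last = (lm.length : Int) - 1 then pl
      else PySem.List.pyGetD lm (last + 1) 0
  (((PySem.List.pyGetD lm (se.1 : Int) 0 + off, mapped_end + off),
    ((se.1 : Int) + off, (se.2 : Int) + off)),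
   PySem.Str.slice nps (some (se.1 : Int)) (some (se.2 : Int)))

def pvSeenInv (lm : List Int) (i : Nat) (seen : PySem.Dict Int Int) : Prop :=
  ∀ v, seen.get? v = (pvLastFrom lm i v).map (fun j => (j : Int))

theorem pvLastFrom_none_of_le (lm : List Int) (i : Nat) (v : Int) (h : lm.length ≤ i) :
    pvLastFrom lm i v = none := by
  unfold pvLastFrom
  rw [List.drop_eq_nil_of_le h]
  simp [PySem.List.index?_eq_idxOf?]

theorem pvLastFrom_step (lm : List Int) (i : Nat) (v : Int) (hi : i < lm.length) :
    pvLastFrom lm i v =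
      if (pvLastFrom lm (i + 1) v).isSome then pvLastFrom lm (i + 1) v
      else if lm.getD i 0 = v then some i else none := by
  unfold pvLastFrom
  rw [List.drop_eq_getElem_cons hi, List.reverse_cons]
  cases hcase : PySem.List.index? (lm.drop (i + 1)).reverse v with
  | some k =>
    have hmem : v ∈ (lm.drop (i + 1)).reverse :=
      (PySem.List.index?_isSome_iff _ _).mp (by rw [hcase]; rfl)
    rw [PySem.List.index?_append_of_mem _ hmem, hcase]
    simp
  | none =>
    have hnmem : v ∉ (lm.drop (i + 1)).reverse := (PySem.List.index?_eq_none_iff _ _).mp hcase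
    have hgetd : lm.getD i 0 = lm[i] := List.getD_eq_getElem lm 0 hi
    by_cases hv : lm[i] = v
    · subst hv
      rw [PySem.List.index?_append_singleton_self _ _ hnmem]
      have hlen : (lm.drop (i + 1)).reverse.length = lm.length - (i + 1) := by simp
      rw [hlen]
      simp only [Option.isSome_none, Bool.false_eq_true, if_false, Option.map_some,
        Option.map_none, hgetd]
      congr 1
      omega
    · have : v ∉ (lm.drop (i + 1)).reverse ++ [lm[i]] := by
        simp only [List.mem_append, List.mem_singleton]
        rintro (h | h)
        · exact hnmem h
        · exact hv h.symm
      rw [(PySem.List.index?_eq_none_iff _ _).mpr this]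
      simp only [Option.map_none, Option.isSome_none, Bool.false_eq_true, if_false]
      rw [if_neg (by rw [hgetd]; exact hv)]

theorem pvLastFrom_zero_of_isSome (lm : List Int) (v : Int) :
    ∀ i, (pvLastFrom lm i v).isSome → pvLastFrom lm 0 v = pvLastFrom lm i v := by
  intro i
  induction i with
  | zero => intro _; rfl
  | succ m ih =>
    intro h
    by_cases hm : m < lm.length
    · have heq : pvLastFrom lm m v = pvLastFrom lm (m + 1) v := by
        rw [pvLastFrom_step lm m v hm, if_pos h]
      rw [← heq]
      exact ih (by rw [heq]; exact h)
    · rw [pvLastFrom_none_of_le lm (m + 1) v (by omega)] at h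
      simp at h

theorem pvLastFrom_isSome (lm : List Int) (v : Int) (i j : Nat)
    (hij : i ≤ j) (hj : j < lm.length) (hv : lm.getD j 0 = v) :
    (pvLastFrom lm i v).isSome := by
  have hvj : lm[j] = v := by rw [← List.getD_eq_getElem lm 0 hj]; exact hv
  have hmem : v ∈ lm.drop i := by
    rw [List.mem_iff_getElem]
    refine ⟨j - i, by simp; omega, ?_⟩
    rw [List.getElem_drop]
    have hji : i + (j - i) = j := by omega
    simp only [hji]
    exact hvj
  unfold pvLastFrom
  rw [Option.isSome_map]
  rw [PySem.List.index?_isSome_iff, List.mem_reverse]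
  exact hmem

-- A's in-loop last_index arithmetic equals the canonical last occurrence
theorem pvLastIndex_eq (lm : List Int) (v : Int) (hv : v ∈ lm) :
    (lm.length : Int) - 1 - (((PySem.List.index? lm.reverse v).getD 0 : Nat) : Int)
      = (((pvLastFrom lm 0 v).getD 0 : Nat) : Int) := by
  have hmemrev : v ∈ lm.reverse := List.mem_reverse.mpr hv
  obtain ⟨k, hk⟩ := Option.isSome_iff_exists.mp ((PySem.List.index?_isSome_iff lm.reverse v).mpr hmemrev)
  obtain ⟨hklt, -, -⟩ := PySem.List.getElem_of_index?_eq_some hk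
  have hkl : k < lm.length := by simpa using hklt
  unfold pvLastFrom
  rw [List.drop_zero, hk]
  simp only [Option.getD_some, Option.map_some]
  omega

theorem pvSeenInv_step (lm : List Int) (i : Nat) (seen : PySem.Dict Int Int)
    (hi : i < lm.length) (hs : pvSeenInv lm (i + 1) seen) :
    pvSeenInv lm i
      (if (seen.get? (PySem.List.pyGetD lm (i : Int) 0)).isNone
       then seen.insert (PySem.List.pyGetD lm (i : Int) 0) (i : Int) else seen) := by
  have hv0 : PySem.List.pyGetD lm (i : Int) 0 = lm.getD i 0 := PySem.List.pyGetD_natCast lm i 0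
  by_cases hsome : (pvLastFrom lm (i + 1) (lm.getD i 0)).isSome
  · obtain ⟨j, hj⟩ := Option.isSome_iff_exists.mp hsome
    have hseen : (seen.get? (PySem.List.pyGetD lm (i : Int) 0)).isNone = false := by
      rw [hv0, hs, hj]; simp
    rw [if_neg (by rw [hseen]; simp)]
    intro v
    rw [hs v]
    congr 1
    rw [pvLastFrom_step lm i v hi]
    by_cases hvv : lm.getD i 0 = v
    · rw [← hvv, if_pos hsome]
    · by_cases h2 : (pvLastFrom lm (i + 1) v).isSome
      · rw [if_pos h2]
      · rw [if_neg h2, if_neg hvv, Option.not_isSome_iff_eq_none.mp h2]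
  · have hseen : (seen.get? (PySem.List.pyGetD lm (i : Int) 0)).isNone = true := by
      rw [hv0, hs, Option.not_isSome_iff_eq_none.mp hsome]; simp
    rw [if_pos hseen]
    intro v
    by_cases hvv : v = lm.getD i 0
    · subst hvv
      rw [hv0, PySem.Dict.get?_insert_self]
      rw [pvLastFrom_step lm i _ hi, if_neg hsome, if_pos rfl]
      rfl
    · rw [hv0, PySem.Dict.get?_insert_of_ne _ _ hvv, hs v]
      congr 1
      rw [pvLastFrom_step lm i v hi]
      by_cases h2 : (pvLastFrom lm (i + 1) v).isSome
      · rw [if_pos h2]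
      · rw [if_neg h2, if_neg (fun h => hvv h.symm), Option.not_isSome_iff_eq_none.mp h2]

theorem pvBEmit_eq (pl : Int) (nps : String) (lm : List Int) (seen : PySem.Dict Int Int) (off : Int)
    (i s e : Nat) (hs : pvSeenInv lm i seen) (he : e = lm.length ∨ (i < e ∧ e ≤ lm.length)) :
    pvBEmit pl nps lm seen off s e = pvMapSpan pl nps lm off (s, e) := by
  by_cases hne : e = lm.length
  · subst hne; simp [pvBEmit, pvMapSpan]
  · have hlt : i < e ∧ e ≤ lm.length := he.resolve_left hne
    have h1e : 1 ≤ e := by omega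
    have hcast : (e : Int) - 1 = ((e - 1 : Nat) : Int) := by omega
    have hkey : PySem.List.pyGetD lm ((e : Int) - 1) 0 = lm.getD (e - 1) 0 := by
      rw [hcast, PySem.List.pyGetD_natCast]
    have hsomei : (pvLastFrom lm i (lm.getD (e - 1) 0)).isSome :=
      pvLastFrom_isSome lm _ i (e - 1) (by omega) (by omega) rfl
    have h0 : pvLastFrom lm 0 (lm.getD (e - 1) 0) = pvLastFrom lm i (lm.getD (e - 1) 0) :=
      pvLastFrom_zero_of_isSome lm _ i hsomei
    unfold pvBEmit pvMapSpan
    simp only [if_neg hne, hkey]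
    rw [hs _, ← h0]
    cases hopt : pvLastFrom lm 0 (lm.getD (e - 1) 0) with
    | none => rw [← h0, hopt] at hsomei; simp at hsomei
    | some j => simp

theorem pvBuildSpans_append (fin : Nat) :
    ∀ (ss : List Nat) (s j : Nat),
      pvBuildSpans s (ss ++ [j]) fin
        = pvBuildSpans s ss j ++ (if j + 1 < fin then [(j + 1, fin)] else []) := by
  intro ss
  induction ss with
  | nil => intro s j; simp [pvBuildSpans]
  | cons x ss ih => intro s j; simp [pvBuildSpans, ih]

theorem pvAGo_eq (pl : Int) (nps : String) (lm : List Int) (off : Int) :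
    ∀ (k i sf : Nat) (ms : List ((Int × Int) × (Int × Int))) (ws : List String),
      lm.length - i = k → i ≤ lm.length → (i = lm.length → ¬ sf < lm.length) →
      pvAGo pl nps lm off i sf ms ws =
        (ms ++ (pvBuildSpans sf (pvSeps nps.toList lm.length i lm.length) lm.length).map
            (fun se => (pvMapSpan pl nps lm off se).1),
         ws ++ (pvBuildSpans sf (pvSeps nps.toList lm.length i lm.length) lm.length).map
            (fun se => (pvMapSpan pl nps lm off se).2)) := by
  intro k
  induction k with
  | zero =>
    intro i sf ms ws hk hi hsf
    have hie : i = lm.length := by omega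
    have hseps : pvSeps nps.toList lm.length i lm.length = [] := by
      unfold pvSeps; rw [hie]; simp
    rw [pvAGo, dif_neg (by omega), hseps]
    simp [pvBuildSpans, hsf hie]
  | succ k ih =>
    intro i sf ms ws hk hi hsf
    have hi' : i < lm.length := by omega
    rw [pvAGo]
    simp only [dif_pos hi']
    by_cases hlast : i = lm.length - 1
    · have hsep0 : pvSeps nps.toList lm.length i lm.length = [] := by
        unfold pvSeps
        rw [show lm.length - i = 1 by omega]
        simp [hlast]
      have hsepn : pvSeps nps.toList lm.length (i + 1) lm.length = [] := by
        unfold pvSeps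
        rw [show lm.length - (i + 1) = 0 by omega]
        simp
      have hn : i + 1 = lm.length := by omega
      rw [if_pos (Or.inr hlast), if_pos hlast, if_pos hlast, hsep0]
      simp only [pvBuildSpans]
      by_cases hguard : sf + 1 ≤ i + 1
      · rw [if_pos hguard,
          ih (i + 1) (i + 1 + 1) _ _ (by omega) (by omega) (by omega), hsepn]
        simp only [pvBuildSpans]
        rw [if_neg (by omega : ¬ i + 1 + 1 < lm.length), if_pos (by omega : sf < lm.length)]
        simp [pvMapSpan, hn]
      · rw [if_neg hguard,
          ih (i + 1) (i + 1 + 1) _ _ (by omega) (by omega) (by omega), hsepn]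
        simp only [pvBuildSpans]
        rw [if_neg (by omega : ¬ i + 1 + 1 < lm.length), if_neg (by omega : ¬ sf < lm.length)]
    · have hpy : PySem.List.pyGetD nps.toList (i : Int) ' ' = nps.toList.getD i ' ' :=
        PySem.List.pyGetD_natCast nps.toList i ' '
      have hsplit : pvSeps nps.toList lm.length i lm.length =
          (i :: List.range' (i + 1) k).filter
            (fun j => decide (nps.toList.getD j ' ' = ' ' ∧ j ≠ lm.length - 1)) := by
        unfold pvSeps
        rw [show lm.length - i = k + 1 by omega, List.range'_succ]
      have hsufx : pvSeps nps.toList lm.length (i + 1) lm.length =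
          (List.range' (i + 1) k).filter
            (fun j => decide (nps.toList.getD j ' ' = ' ' ∧ j ≠ lm.length - 1)) := by
        unfold pvSeps
        rw [show lm.length - (i + 1) = k by omega]
      by_cases hsp : nps.toList.getD i ' ' = ' '
      · have hfil : pvSeps nps.toList lm.length i lm.length =
            i :: pvSeps nps.toList lm.length (i + 1) lm.length := by
          rw [hsplit, hsufx, List.filter_cons, if_pos (by simp only [decide_eq_true_eq]; exact ⟨hsp, hlast⟩)]
        rw [if_pos (Or.inl (hpy.trans hsp)), if_neg hlast, if_neg hlast, hfil]
        simp only [pvBuildSpans]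
        by_cases hguard : sf + 1 ≤ i
        · rw [if_pos hguard, ih (i + 1) (i + 1) _ _ (by omega) (by omega) (by omega),
            if_pos (by omega : sf < i)]
          have h1i : 1 ≤ i := by omega
          have hvmem : PySem.List.pyGetD lm ((i : Int) - 1) 0 ∈ lm := by
            rw [show ((i : Int) - 1) = ((i - 1 : Nat) : Int) by omega, PySem.List.pyGetD_natCast,
              List.getD_eq_getElem lm 0 (by omega : i - 1 < lm.length)]
            exact List.getElem_mem _
          rw [pvLastIndex_eq lm _ hvmem]
          simp only [pvMapSpan, List.map_cons,
            if_neg (by omega : ¬ i = lm.length), List.append_assoc, List.singleton_append]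
        · rw [if_neg hguard, ih (i + 1) (i + 1) _ _ (by omega) (by omega) (by omega),
            if_neg (by omega : ¬ sf < i)]
          simp
      · have hfil : pvSeps nps.toList lm.length i lm.length =
            pvSeps nps.toList lm.length (i + 1) lm.length := by
          rw [hsplit, hsufx, List.filter_cons, if_neg (by simp only [decide_eq_true_eq]; intro h; exact hsp h.1)]
        have hcond : ¬ (PySem.List.pyGetD nps.toList (i : Int) ' ' = ' ' ∨ i = lm.length - 1) := by
          rw [hpy]; rintro (h | h); exacts [hsp h, hlast h]
        rw [if_neg hcond, hfil]
        exact ih (i + 1) sf ms ws (by omega) (by omega) (by omega)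

theorem pvBGo_eq (pl : Int) (nps : String) (lm : List Int) (off : Int) :
    ∀ (i : Nat) (seen : PySem.Dict Int Int) (e : Nat)
      (accM : List ((Int × Int) × (Int × Int))) (accW : List String),
      i ≤ e → e ≤ lm.length → pvSeenInv lm i seen →
      pvBGo pl nps lm off i seen e accM accW =
        ((pvBuildSpans 0 (pvSeps nps.toList lm.length 0 i) e).map
            (fun se => (pvMapSpan pl nps lm off se).1) ++ accM.reverse,
         (pvBuildSpans 0 (pvSeps nps.toList lm.length 0 i) e).map
            (fun se => (pvMapSpan pl nps lm off se).2) ++ accW.reverse) := by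
  intro i
  induction i with
  | zero =>
    intro seen e accM accW _ hen hs
    have hseps : pvSeps nps.toList lm.length 0 0 = [] := by unfold pvSeps; simp
    rw [pvBGo, hseps]
    simp only [pvBuildSpans]
    by_cases h0e : 0 < e
    · rw [if_pos h0e, if_pos h0e,
        pvBEmit_eq pl nps lm seen off 0 0 e hs (Or.inr ⟨h0e, hen⟩)]
      simp
    · rw [if_neg h0e, if_neg h0e]
      simp
  | succ i ih =>
    intro seen e accM accW hie hen hs
    have hi : i < lm.length := by omega
    have hs' := pvSeenInv_step lm i seen hi hs
    have hpy : PySem.List.pyGetD nps.toList (i : Int) ' ' = nps.toList.getD i ' ' :=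
      PySem.List.pyGetD_natCast nps.toList i ' '
    have hsplit : pvSeps nps.toList lm.length 0 (i + 1) =
        pvSeps nps.toList lm.length 0 i ++
          (if nps.toList.getD i ' ' = ' ' ∧ i ≠ lm.length - 1 then [i] else []) := by
      unfold pvSeps
      rw [Nat.sub_zero, Nat.sub_zero, List.range'_concat, List.filter_append]
      congr 1
      simp [List.filter_cons]
    rw [pvBGo]
    simp only []
    by_cases hc : PySem.List.pyGetD nps.toList (i : Int) ' ' = ' ' ∧ i ≠ lm.length - 1
    · have hcg : nps.toList.getD i ' ' = ' ' ∧ i ≠ lm.length - 1 := ⟨hpy ▸ hc.1, hc.2⟩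
      rw [if_pos hc, hsplit, if_pos hcg, pvBuildSpans_append]
      by_cases hguard : i + 1 < e
      · rw [if_pos hguard, if_pos hguard,
          pvBEmit_eq pl nps lm _ off i (i + 1) e hs' (Or.inr ⟨by omega, hen⟩),
          ih _ i _ _ le_rfl (by omega) hs']
        simp
      · rw [if_neg hguard, if_neg hguard, ih _ i _ _ le_rfl (by omega) hs']
        simp
    · have hcg : ¬ (nps.toList.getD i ' ' = ' ' ∧ i ≠ lm.length - 1) := by
        intro h; exact hc ⟨hpy.symm ▸ h.1, h.2⟩
      rw [if_neg hc, hsplit, if_neg hcg, List.append_nil,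
        ih _ e _ _ (by omega) hen hs']

-- ===== VERDICT (by name: the statement is the Claim_ definition above) =====
theorem get_word_mappings_py_spec : Claim_equal_get_word_mappings_py := by
  intro ph np lm seps os on _ hpre
  unfold Spec_get_word_mappings_py get_word_mappings_py get_word_mappings_py_alt
  rw [if_neg (by exact fun h => h hpre), if_neg (by exact fun h => h hpre)]
  have hinv : pvSeenInv lm lm.length PySem.Dict.empty := by
    intro v
    rw [pvLastFrom_none_of_le lm lm.length v le_rfl]
    simp [PySem.Dict.get?, PySem.Dict.empty]
  rw [pvAGo_eq (PySem.Str.len ph) np lm os lm.length 0 0 [] [] (by omega) (by omega) (by omega),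
      pvBGo_eq (PySem.Str.len ph) np lm os lm.length PySem.Dict.empty lm.length [] [] le_rfl le_rfl hinv]
  simp
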